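-- pv_equiv track=rewrite | github.com/sachin-deshik-10/O-RAN-Security-Test-Case-Generator | app.py | concat_verbs
-- ===== SOURCE A (Python) =====
-- def concat_verbs(ents):
--     verbs = []
--     left = 0
--     word = ""
--     while left < len(ents):
--         while left < len(ents):
--             if ents[left]["label"] != "VERB":
--                 break
--             word += f"{ents[left]['word']} "
--             left += 1
--
--         if word:
--             verbs.append(word)
--             word = ""
--
--         left += 1
--
--     return verbs
-- ===== SOURCE B (Python) =====
-- def concat_verbs(ents):
--     # Backward scan: walk ents right-to-left; a VERB either starts a new run at the
--     # front of the output or, if the following entry (original order) was also a VERB,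
--     # is prepended onto the current first run. No run buffer, no index arithmetic.
--     verbs = []
--     next_is_verb = False
--     for e in reversed(ents):
--         is_verb = e["label"] == "VERB"
--         if is_verb:
--             piece = f"{e['word']} "
--             if next_is_verb:
--                 verbs[0] = piece + verbs[0]
--             else:
--                 verbs.insert(0, piece)
--         next_is_verb = is_verb
--     return verbs
-- ===== Notes on version B (the rewrite author's own statement) =====
-- stated objective: alternative
-- what changed: Replaced A's forward index/nested-while state machine with a mutable run buffer by a single backward scan that builds the output front-first: each VERB either starts a new run at the head of the result or is prepended onto the current first run, so no run accumulator or index arithmetic remains.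
import Mathlib
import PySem

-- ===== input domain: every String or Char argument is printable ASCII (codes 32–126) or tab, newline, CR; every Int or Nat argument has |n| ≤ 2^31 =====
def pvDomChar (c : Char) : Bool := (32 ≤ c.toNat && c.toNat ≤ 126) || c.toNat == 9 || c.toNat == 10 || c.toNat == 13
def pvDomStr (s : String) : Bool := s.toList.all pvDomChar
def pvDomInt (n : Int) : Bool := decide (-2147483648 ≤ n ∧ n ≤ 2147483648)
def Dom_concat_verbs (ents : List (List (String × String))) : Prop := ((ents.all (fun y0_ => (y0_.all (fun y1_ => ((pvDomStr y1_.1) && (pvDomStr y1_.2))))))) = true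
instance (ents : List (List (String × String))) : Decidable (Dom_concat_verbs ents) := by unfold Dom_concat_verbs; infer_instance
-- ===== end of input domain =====

-- B replaces A's forward index/nested-while state machine (mutable run buffer `word`) with a
-- single backward scan that builds the output front-first: each VERB either starts a new run
-- at the head of the result or is prepended onto the current first run; objective: alternative.

-- ===== PORT A =====

-- ents[left]["label"] / ents[left]["word"]: dict lookup, first match; `.getD ""` stands for the
-- KeyError case, which Pre_ excludes.
def pvLabel (e : List (String × String)) : String := ((PySem.Dict.mk e).get? "label").getD ""
def pvWord (e : List (String × String)) : String := ((PySem.Dict.mk e).get? "word").getD ""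

-- inner `while left < len(ents): if ents[left]["label"] != "VERB": break; word += ...; left += 1`
-- over the suffix of ents starting at `left`; returns (remaining suffix, word).
def pvInner : List (List (String × String)) → String → (List (List (String × String))) × String
  | [], word => ([], word)
  | e :: rest, word =>
      if pvLabel e ≠ "VERB" then (e :: rest, word)
      else pvInner rest (word ++ pvWord e ++ " ")

theorem pvInner_fst_len (l : List (List (String × String))) (w : String) :
    (pvInner l w).1.length ≤ l.length := by
  induction l generalizing w with
  | nil => simp [pvInner]
  | cons e rest ih =>
      by_cases h : pvLabel e ≠ "VERB"
      · simp [pvInner, h]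
      · simp only [pvInner, if_neg h]
        exact Nat.le_trans (ih _) (Nat.le_succ _)

-- outer `while left < len(ents)` loop with state (suffix, word, verbs).
def pvOuter : List (List (String × String)) → String → List String → List String
  | [], _, verbs => verbs
  | e :: rest, word, verbs =>
      let p := pvInner (e :: rest) word
      let verbs' := if p.2 ≠ "" then verbs ++ [p.2] else verbs
      let word' := if p.2 ≠ "" then "" else p.2
      pvOuter (p.1.drop 1) word' verbs'
termination_by l _ _ => l.length
decreasing_by
  have h := pvInner_fst_len (e :: rest) word
  simp only [List.length_drop]
  simp only [List.length_cons] at h ⊢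
  omega

def concat_verbs (ents : List (List (String × String))) : List String :=
  pvOuter ents "" []

-- ===== PORT B =====

-- one iteration of `for e in reversed(ents)` with state (verbs, next_is_verb);
-- `verbs[0] = piece + verbs[0]` is the match on the head ([] would be Python's IndexError,
-- unreachable: next_is_verb = True means verbs was just given a first element).
def pvStep (st : List String × Bool) (e : List (String × String)) : List String × Bool :=
  let is_verb := pvLabel e == "VERB"
  let verbs :=
    if is_verb then
      let piece := pvWord e ++ " "
      if st.2 then
        match st.1 with
        | v :: vs => (piece ++ v) :: vs
        | [] => []
      else PySem.List.insert st.1 0 piece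
    else st.1
  (verbs, is_verb)

def concat_verbs_alt (ents : List (List (String × String))) : List String :=
  (ents.reverse.foldl pvStep ([], false)).1

-- ===== PRECONDITION & SPEC =====
-- Pre_ excludes exactly the inputs on which the Python A raises KeyError: an entry with no
-- "label" key, or a VERB-labeled entry with no "word" key (B raises there too).
def Pre_concat_verbs (ents : List (List (String × String))) : Prop :=
  (ents.all (fun e =>
    match (PySem.Dict.mk e).get? "label" with
    | none => false
    | some l => l != "VERB" || ((PySem.Dict.mk e).get? "word").isSome)) = true
instance (ents : List (List (String × String))) : Decidable (Pre_concat_verbs ents) := by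
  unfold Pre_concat_verbs; infer_instance

def pvWitness_concat_verbs : (List (List (String × String))) :=
  [[("label", "VERB"), ("word", "run")], [("label", "NOUN")], [("label", "VERB"), ("word", "go")]]

def Spec_concat_verbs (ents : List (List (String × String))) (out : List String) : Prop := out = concat_verbs_alt ents
instance (ents : List (List (String × String))) (out : List String) : Decidable (Spec_concat_verbs ents out) := by unfold Spec_concat_verbs; infer_instance

-- ===== CLAIM (what is proved, stated in full; the proofs are below) =====
def Claim_equal_concat_verbs : Prop := ∀ (ents : List (List (String × String))), Dom_concat_verbs ents → Pre_concat_verbs ents → Spec_concat_verbs ents (concat_verbs ents)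

-- ===== LEMMAS AND PROOFS =====

def pvIsV (e : List (String × String)) : Bool := pvLabel e == "VERB"

-- the text of a run, as A builds it: one f"{word} " piece per entry
def pvJoin (g : List (List (String × String))) : String :=
  g.foldr (fun e acc => pvWord e ++ " " ++ acc) ""

-- B's loop as a right fold over ents (foldl over the reverse IS foldr)
def pvB (l : List (List (String × String))) : List String × Bool :=
  l.foldr (fun e st => pvStep st e) ([], false)

theorem pvB_eq_alt (ents : List (List (String × String))) :
    concat_verbs_alt ents = (pvB ents).1 := by
  simp [concat_verbs_alt, pvB, List.foldl_reverse]

theorem pvB_snd (e : List (String × String)) (l : List (List (String × String))) :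
    (pvB (e :: l)).2 = pvIsV e := rfl

theorem pvInner_spec (l : List (List (String × String))) (w : String) :
    pvInner l w = (l.dropWhile pvIsV, w ++ pvJoin (l.takeWhile pvIsV)) := by
  induction l generalizing w with
  | nil => simp [pvInner, pvJoin]
  | cons e rest ih =>
      by_cases h : pvLabel e = "VERB"
      · simp [pvInner, h, pvIsV, ih, pvJoin, String.append_assoc]
      · simp [pvInner, h, pvIsV, pvJoin]

theorem pvJoin_cons_ne_empty (e : List (String × String)) (g : List (List (String × String))) :
    pvJoin (e :: g) ≠ "" := by
  intro h
  have := congrArg String.length h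
  simp [pvJoin, String.length_append] at this

theorem pvB_cons_nonverb (e : List (String × String)) (rest : List (List (String × String)))
    (h : pvLabel e ≠ "VERB") : (pvB (e :: rest)).1 = (pvB rest).1 := by
  simp [pvB, pvStep, h]

theorem pvB_cons_verb (rest : List (List (String × String))) :
    ∀ e, pvLabel e = "VERB" →
      (pvB (e :: rest)).1 =
        pvJoin (e :: rest.takeWhile pvIsV) :: (pvB (rest.dropWhile pvIsV)).1 := by
  induction rest with
  | nil =>
      intro e he
      simp [pvB, pvStep, he, pvJoin, PySem.List.insert]
  | cons f d ih =>
      intro e he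
      by_cases hf : pvLabel f = "VERB"
      · have hfst := ih f hf
        have hsnd : (pvB (f :: d)).2 = true := by simp [pvB_snd, pvIsV, hf]
        show (pvStep (pvB (f :: d)) e).1 = _
        simp only [pvStep, he, beq_self_eq_true, if_true, hsnd, hfst]
        simp [pvIsV, hf, pvJoin, String.append_assoc]
      · have hsnd : (pvB (f :: d)).2 = false := by simp [pvB_snd, pvIsV, hf]
        show (pvStep (pvB (f :: d)) e).1 = _
        simp only [pvStep, he, beq_self_eq_true, if_true, hsnd]
        simp [pvIsV, hf, pvJoin, PySem.List.insert, PySem.List.sliceIndices]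

theorem pvOuter_acc (n : ℕ) : ∀ (l : List (List (String × String))) (w : String)
    (verbs : List String), l.length ≤ n → pvOuter l w verbs = verbs ++ pvOuter l w [] := by
  induction n with
  | zero =>
      intro l w verbs hl
      have : l = [] := List.eq_nil_of_length_eq_zero (Nat.le_zero.mp hl)
      subst this; simp [pvOuter]
  | succ n ih =>
      intro l w verbs hl
      match l with
      | [] => simp [pvOuter]
      | e :: rest =>
          simp only [pvOuter]
          have hlen : ((pvInner (e :: rest) w).1.drop 1).length ≤ n := by
            have h1 := pvInner_fst_len (e :: rest) w
            simp only [List.length_cons] at h1 hl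
            simp only [List.length_drop]
            omega
          by_cases h : (pvInner (e :: rest) w).2 = ""
          · simp only [h, ne_eq, not_true_eq_false, if_false]
            exact ih _ _ _ hlen
          · simp only [h, ne_eq, not_false_eq_true, if_true]
            rw [ih _ _ (verbs ++ [(pvInner (e :: rest) w).2]) hlen,
              ih _ _ ([] ++ [(pvInner (e :: rest) w).2]) hlen]
            simp

theorem pvHead_dropWhile {α : Type} (p : α → Bool) :
    ∀ (l : List α) (f : α) (d : List α), l.dropWhile p = f :: d → p f = false := by
  intro l
  induction l with
  | nil => intro f d h; simp [List.dropWhile] at h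
  | cons e rest ih =>
      intro f d h
      by_cases hp : p e
      · rw [List.dropWhile_cons_of_pos hp] at h; exact ih f d h
      · rw [List.dropWhile_cons_of_neg hp] at h
        cases h; simpa using hp

theorem pvMain (n : ℕ) : ∀ (ents : List (List (String × String))), ents.length ≤ n →
    concat_verbs ents = (pvB ents).1 := by
  induction n with
  | zero =>
      intro ents hl
      have : ents = [] := List.eq_nil_of_length_eq_zero (Nat.le_zero.mp hl)
      subst this; simp [concat_verbs, pvOuter, pvB]
  | succ n ih =>
      intro ents hl
      match ents with
      | [] => simp [concat_verbs, pvOuter, pvB]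
      | e :: rest =>
          simp only [List.length_cons] at hl
          by_cases h : pvLabel e = "VERB"
          · -- VERB run at the head
            have htw : (e :: rest).takeWhile pvIsV = e :: rest.takeWhile pvIsV :=
              List.takeWhile_cons_of_pos (by simp [pvIsV, h])
            have hdw : (e :: rest).dropWhile pvIsV = rest.dropWhile pvIsV :=
              List.dropWhile_cons_of_pos (by simp [pvIsV, h])
            have hne : pvJoin (e :: rest.takeWhile pvIsV) ≠ "" := pvJoin_cons_ne_empty _ _
            have hdlen : (rest.dropWhile pvIsV).length ≤ rest.length :=
              List.length_dropWhile_le _ _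
            have hlen : ((rest.dropWhile pvIsV).drop 1).length ≤ n := by
              simp only [List.length_drop]; omega
            show pvOuter (e :: rest) "" [] = _
            simp only [pvOuter, pvInner_spec, htw, hdw, String.empty_append]
            simp only [hne, ne_eq, not_false_eq_true, if_true, List.nil_append]
            rw [pvOuter_acc n _ _ _ hlen, pvB_cons_verb rest e h]
            refine congrArg₂ _ rfl ?_
            match hd : rest.dropWhile pvIsV with
            | [] => simp [pvOuter, pvB]
            | f :: d' =>
                have hf : pvLabel f ≠ "VERB" := by
                  have := pvHead_dropWhile pvIsV rest f d' hd
                  simpa [pvIsV] using this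
                have hlen' : d'.length ≤ n := by
                  have : (f :: d').length ≤ rest.length := hd ▸ hdlen
                  simp only [List.length_cons] at this; omega
                show pvOuter d' "" [] = _
                rw [show pvOuter d' "" [] = concat_verbs d' from rfl, ih d' hlen']
                exact (pvB_cons_nonverb f d' hf).symm
          · -- non-VERB head: A skips it, B's step leaves verbs unchanged
            have htw : (e :: rest).takeWhile pvIsV = [] :=
              List.takeWhile_cons_of_neg (by simp [pvIsV, h])
            have hdw : (e :: rest).dropWhile pvIsV = e :: rest :=
              List.dropWhile_cons_of_neg (by simp [pvIsV, h])
            show pvOuter (e :: rest) "" [] = _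
            simp only [pvOuter, pvInner_spec, htw, hdw, pvJoin, List.foldr_nil,
              String.append_empty]
            rw [if_neg (fun hc => hc rfl), if_neg (fun hc => hc rfl)]
            rw [show List.drop 1 (e :: rest) = rest from rfl,
              show pvOuter rest "" [] = concat_verbs rest from rfl, ih rest (by omega),
              pvB_cons_nonverb e rest h]

-- ===== VERDICT (by name: the statement is the Claim_ definition above) =====
theorem concat_verbs_spec : Claim_equal_concat_verbs := by
  intro ents _ _
  show concat_verbs ents = concat_verbs_alt ents
  rw [pvB_eq_alt]
  exact pvMain ents.length ents le_rfl
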